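-- pv_equiv track=rewrite | github.com/ethankuehler/gochess | display_binary.py | generate_knight_move
-- ===== SOURCE A (Python) =====
-- class Position:
--     def __init__(self, pos="a1"):
--         self.columns = ["a", "b", "c", "d", "e", "f", "g", "h"]
--         self.loc = [self.columns.index(pos[0]), int(pos[1]) - 1]
--
--     def __lt__(self, lhs):
--         rhs = self.loc
--         return (rhs[0] + rhs[1] * 8) < (lhs[0] + lhs[1] * 8)
--
--     def __le__(self, lhs):
--         rhs = self.loc
--         return (rhs[0] + rhs[1] * 8) <= (lhs[0] + lhs[1] * 8)
--
--     def __eq__(self, lhs):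
--         rhs = self.loc
--         return rhs == lhs
--
--     def add(self, col, row):
--         new_col = self.loc[0] + col
--         new_row = self.loc[1] + row
--         if (0 <= new_col < 8) and (0 <= new_row < 8):
--             new_pos = Position()
--             new_pos.loc = [new_col, new_row]
--             return new_pos
--         else:
--             return None
--
--     def getInt(self):
--         return 1 << (self.loc[0] + self.loc[1] * 8)
--
--     def getShift(self):
--         return self.loc[0] + self.loc[1] * 8
--
--     def getString(self):
--         return self.columns[self.loc[0]] + str(self.loc[1] + 1)
--
-- def generate_knight_move(start: str) -> int:
--     perms = [(1, 2), (2, 1), (-1, 2), (2, -1), (1, -2), (-2, 1), (-1, -2), (-2, -1)]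
--     sPos = Position(start)
--     int_attack = 0
--     for i in perms:
--         new_attack = sPos.add(i[0], i[1])
--         if new_attack is not None:
--             int_attack |= new_attack.getInt()
--
--     return int_attack
-- ===== SOURCE B (Python) =====
-- def generate_knight_move(start: str) -> int:
--     # Bit-parallel knight attacks: shift the square's bitboard by the eight
--     # knight deltas and mask off file wraparound; no loop, no per-move bounds check.
--     col = "abcdefgh".index(start[0])
--     row = int(start[1]) - 1
--     bb = 1 << (col + row * 8)
--     NOT_A = 0xFEFEFEFEFEFEFEFE
--     NOT_AB = 0xFCFCFCFCFCFCFCFC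
--     NOT_H = 0x7F7F7F7F7F7F7F7F
--     NOT_GH = 0x3F3F3F3F3F3F3F3F
--     U64 = (1 << 64) - 1
--     return (((bb << 17) & NOT_A)
--             | ((bb << 15) & NOT_H)
--             | ((bb << 10) & NOT_AB)
--             | ((bb << 6) & NOT_GH)
--             | ((bb >> 15) & NOT_A)
--             | ((bb >> 17) & NOT_H)
--             | ((bb >> 6) & NOT_AB)
--             | ((bb >> 10) & NOT_GH)) & U64
-- ===== Notes on version B (the rewrite author's own statement) =====
-- stated objective: alternative
-- what changed: Replaces the loop over eight knight offsets with per-square bounds checks by the standard bit-parallel formula: eight shifts of the square's bitboard masked by file masks and a 64-bit mask, OR-ed together.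
-- outside the precondition, e.g. on generate_knight_move('a0'): A returns 516, B raises ValueError
import Mathlib
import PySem

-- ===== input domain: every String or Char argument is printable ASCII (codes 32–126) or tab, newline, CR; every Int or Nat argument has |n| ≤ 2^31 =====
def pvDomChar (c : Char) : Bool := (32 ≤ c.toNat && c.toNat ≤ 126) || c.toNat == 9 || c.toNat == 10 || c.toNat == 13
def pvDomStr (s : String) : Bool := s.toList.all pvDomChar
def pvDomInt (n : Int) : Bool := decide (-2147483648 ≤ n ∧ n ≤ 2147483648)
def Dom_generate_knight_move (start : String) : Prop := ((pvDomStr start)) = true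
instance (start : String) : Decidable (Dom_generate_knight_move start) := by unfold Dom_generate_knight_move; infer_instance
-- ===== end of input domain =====

-- B replaces A's offset loop with the standard bit-parallel knight-attack formula
-- (eight masked shifts OR-ed together); return-value equivalence only, A mutates nothing.

-- ===== PORT A =====
def generate_knight_move (start : String) : Int :=
  -- Position(start): col = columns.index(start[0]), row = int(start[1]) - 1
  let columns : List Char := ['a','b','c','d','e','f','g','h']
  let c0 := (PySem.Str.pyGet? start 0).getD ' '
  let c1 := (PySem.Str.pyGet? start 1).getD ' '
  let col : Int := ((PySem.List.index? columns c0).getD 0 : Nat)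
  let row : Int := (PySem.Int.ofChars? [c1]).getD 0 - 1
  let perms : List (Int × Int) := [(1,2),(2,1),(-1,2),(2,-1),(1,-2),(-2,1),(-1,-2),(-2,-1)]
  perms.foldl (fun acc i =>
    let nc := col + i.1
    let nr := row + i.2
    if 0 ≤ nc ∧ nc < 8 ∧ 0 ≤ nr ∧ nr < 8 then
      PySem.Int.bor acc ((1 : Int) <<< (nc + nr * 8).toNat)
    else acc) 0

-- ===== PORT B =====
def generate_knight_move_alt (start : String) : Int :=
  let c0 := (PySem.Str.pyGet? start 0).getD ' '
  let c1 := (PySem.Str.pyGet? start 1).getD ' '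
  let col : Int := ((PySem.List.index? "abcdefgh".toList c0).getD 0 : Nat)
  let row : Int := (PySem.Int.ofChars? [c1]).getD 0 - 1
  let bb : Int := (1 : Int) <<< (col + row * 8).toNat
  let notA  : Int := 0xFEFEFEFEFEFEFEFE
  let notAB : Int := 0xFCFCFCFCFCFCFCFC
  let notH  : Int := 0x7F7F7F7F7F7F7F7F
  let notGH : Int := 0x3F3F3F3F3F3F3F3F
  let u64   : Int := (1 <<< 64) - 1
  PySem.Int.band
    (PySem.Int.bor (PySem.Int.bor (PySem.Int.bor (PySem.Int.band (bb <<< 17) notA)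
                                                 (PySem.Int.band (bb <<< 15) notH))
                                  (PySem.Int.bor (PySem.Int.band (bb <<< 10) notAB)
                                                 (PySem.Int.band (bb <<< 6) notGH)))
    (PySem.Int.bor (PySem.Int.bor (PySem.Int.band (bb >>> 15) notA)
                                  (PySem.Int.band (bb >>> 17) notH))
                   (PySem.Int.bor (PySem.Int.band (bb >>> 6) notAB)
                                  (PySem.Int.band (bb >>> 10) notGH))))
    u64

-- ===== PRECONDITION & SPEC =====
-- Helper for Pre_: first char a file a–h, second char a rank digit 1–9.
def pvPreChars (cs : List Char) : Bool :=
  match cs with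
  | c0 :: c1 :: _ =>
      (c0 ∈ (['a','b','c','d','e','f','g','h'] : List Char)) &&
      (c1 ∈ (['1','2','3','4','5','6','7','8','9'] : List Char))
  | _ => false

-- Pre_ excludes (besides inputs where A raises) squares whose rank digit is zero, on which
-- A returns an attack set computed from the off-board row below the board while B's shift by
-- a negative amount raises ValueError (cited example: "a0").
def Pre_generate_knight_move (start : String) : Prop := pvPreChars start.toList = true
instance (start : String) : Decidable (Pre_generate_knight_move start) := by
  unfold Pre_generate_knight_move; infer_instance

def pvWitness_generate_knight_move : String := "e4"

def Spec_generate_knight_move (start : String) (out : Int) : Prop := out = generate_knight_move_alt start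
instance (start : String) (out : Int) : Decidable (Spec_generate_knight_move start out) := by unfold Spec_generate_knight_move; infer_instance

-- ===== CLAIM (what is proved, stated in full; the proofs are below) =====
def Claim_equal_generate_knight_move : Prop := ∀ (start : String), Dom_generate_knight_move start → Pre_generate_knight_move start → Spec_generate_knight_move start (generate_knight_move start)

-- ===== LEMMAS AND PROOFS =====

-- ===== VERDICT (by name: the statement is the Claim_ definition above) =====
theorem generate_knight_move_spec : Claim_equal_generate_knight_move := by
  intro start _ hpre
  unfold Spec_generate_knight_move
  unfold Pre_generate_knight_move pvPreChars at hpre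
  rcases hcs : start.toList with _ | ⟨c0, _ | ⟨c1, rest⟩⟩ <;> rw [hcs] at hpre <;>
    simp only [Bool.and_eq_true, decide_eq_true_eq] at hpre
  · exact absurd hpre (by simp)
  · exact absurd hpre (by simp)
  obtain ⟨h0, h1⟩ := hpre
  have e0 : PySem.Str.pyGet? start 0 = some c0 := by
    simp [PySem.Str.pyGet?, hcs, PySem.List.pyGet?_zero_cons]
  have e1 : PySem.Str.pyGet? start 1 = some c1 := by
    simp [PySem.Str.pyGet?, hcs]
  unfold generate_knight_move generate_knight_move_alt
  rw [e0, e1]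
  fin_cases h0 <;> fin_cases h1 <;> decide
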